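-- pv_equiv track=rewrite | github.com/goksnair/resume-builder-ai | apps/backend/app/services/enhanced_conversation_service.py | _extract_role_enhanced
-- ===== SOURCE A (Python) =====
-- from typing import Optional, List, Dict, Any
--
-- def _extract_role_enhanced(message: str) -> Optional[str]:
--     """Enhanced role extraction with comprehensive role database"""
--     roles = {
--         # Technology roles
--         'software engineer': 'Software Engineer',
--         'software developer': 'Software Developer',
--         'full stack developer': 'Full Stack Developer',
--         'frontend developer': 'Frontend Developer',
--         'backend developer': 'Backend Developer',
--         'data scientist': 'Data Scientist',
--         'data analyst': 'Data Analyst',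
--         'devops engineer': 'DevOps Engineer',
--         'cloud engineer': 'Cloud Engineer',
--         'security engineer': 'Security Engineer',
--         'mobile developer': 'Mobile Developer',
--         'web developer': 'Web Developer',
--
--         # Management roles
--         'product manager': 'Product Manager',
--         'project manager': 'Project Manager',
--         'engineering manager': 'Engineering Manager',
--         'technical lead': 'Technical Lead',
--         'team lead': 'Team Lead',
--
--         # Business roles
--         'business analyst': 'Business Analyst',
--         'marketing manager': 'Marketing Manager',
--         'sales manager': 'Sales Manager',
--         'account manager': 'Account Manager',
--         'consultant': 'Consultant',
--         'business consultant': 'Business Consultant',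
--
--         # Design roles
--         'ux designer': 'UX Designer',
--         'ui designer': 'UI Designer',
--         'product designer': 'Product Designer',
--         'graphic designer': 'Graphic Designer',
--
--         # Other roles
--         'architect': 'Solutions Architect',
--         'designer': 'Designer',
--         'developer': 'Developer',
--         'engineer': 'Engineer',
--         'manager': 'Manager',
--         'analyst': 'Analyst'
--     }
--
--     message_lower = message.lower()
--
--     # Sort by length (longest first) to match more specific roles first
--     sorted_roles = sorted(roles.items(), key=lambda x: len(x[0]), reverse=True)
--
--     for key, value in sorted_roles:
--         if key in message_lower:
--             return value
--     return None
-- ===== SOURCE B (Python) =====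
-- from typing import Optional
--
-- _ROLE_KEYS = [
--     'software engineer', 'software developer', 'full stack developer',
--     'frontend developer', 'backend developer', 'data scientist',
--     'data analyst', 'devops engineer', 'cloud engineer',
--     'security engineer', 'mobile developer', 'web developer',
--     'product manager', 'project manager', 'engineering manager',
--     'technical lead', 'team lead', 'business analyst',
--     'marketing manager', 'sales manager', 'account manager',
--     'consultant', 'business consultant', 'ux designer', 'ui designer',
--     'product designer', 'graphic designer', 'architect', 'designer',
--     'developer', 'engineer', 'manager', 'analyst',
-- ]
--
-- _SPECIAL_WORDS = {'devops': 'DevOps', 'ux': 'UX', 'ui': 'UI'}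
--
--
-- def _format_role(key):
--     # Display names are the title-cased keys, apart from a few special words
--     # and the 'architect' -> 'Solutions Architect' alias.
--     if key == 'architect':
--         return 'Solutions Architect'
--     return ' '.join(_SPECIAL_WORDS.get(w, w.capitalize()) for w in key.split())
--
--
-- def _extract_role_enhanced(message: str) -> Optional[str]:
--     """Enhanced role extraction: single pass keeping the longest matching
--     role key (first one on ties), then derive its display name."""
--     message_lower = message.lower()
--     best = None
--     for key in _ROLE_KEYS:
--         if key in message_lower and (best is None or len(key) > len(best)):
--             best = key
--     return None if best is None else _format_role(best)
-- ===== Notes on version B (the rewrite author's own statement) =====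
-- stated objective: simpler
-- what changed: Replaces sort-the-whole-table-then-scan over a 33-entry key-to-display-name dict with a single running-argmax pass over the bare key list (first longest matching key, reproducing the stable sort's insertion-order tie-break) and derives the display name from the winning key by title-casing its words with a 3-word exception table plus a one-key alias, instead of storing all 33 display strings.
import Mathlib
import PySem

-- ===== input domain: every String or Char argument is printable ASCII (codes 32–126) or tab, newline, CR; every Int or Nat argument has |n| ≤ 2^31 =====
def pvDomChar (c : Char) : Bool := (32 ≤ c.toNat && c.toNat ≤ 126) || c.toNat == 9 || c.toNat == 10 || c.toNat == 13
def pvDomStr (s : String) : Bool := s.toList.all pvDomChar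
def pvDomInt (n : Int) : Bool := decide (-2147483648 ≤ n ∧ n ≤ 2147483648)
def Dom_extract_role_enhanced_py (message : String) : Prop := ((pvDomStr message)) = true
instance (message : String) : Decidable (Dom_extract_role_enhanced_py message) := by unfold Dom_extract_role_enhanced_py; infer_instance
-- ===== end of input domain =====

-- B replaces A's sort-the-whole-table-then-scan with a single running-argmax pass over
-- the bare KEY list (first longest matching key wins, as in A's stable sort), deriving
-- the display name from the key by title-casing with a tiny exception table instead of
-- storing all 33 display strings (objective: simpler).

-- ===== PORT A =====
-- A's literal role dict, in insertion order.
def pvRoles : List (String × String) :=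
  [("software engineer", "Software Engineer"),
   ("software developer", "Software Developer"),
   ("full stack developer", "Full Stack Developer"),
   ("frontend developer", "Frontend Developer"),
   ("backend developer", "Backend Developer"),
   ("data scientist", "Data Scientist"),
   ("data analyst", "Data Analyst"),
   ("devops engineer", "DevOps Engineer"),
   ("cloud engineer", "Cloud Engineer"),
   ("security engineer", "Security Engineer"),
   ("mobile developer", "Mobile Developer"),
   ("web developer", "Web Developer"),
   ("product manager", "Product Manager"),
   ("project manager", "Project Manager"),
   ("engineering manager", "Engineering Manager"),
   ("technical lead", "Technical Lead"),
   ("team lead", "Team Lead"),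
   ("business analyst", "Business Analyst"),
   ("marketing manager", "Marketing Manager"),
   ("sales manager", "Sales Manager"),
   ("account manager", "Account Manager"),
   ("consultant", "Consultant"),
   ("business consultant", "Business Consultant"),
   ("ux designer", "UX Designer"),
   ("ui designer", "UI Designer"),
   ("product designer", "Product Designer"),
   ("graphic designer", "Graphic Designer"),
   ("architect", "Solutions Architect"),
   ("designer", "Designer"),
   ("developer", "Developer"),
   ("engineer", "Engineer"),
   ("manager", "Manager"),
   ("analyst", "Analyst")]

-- the 'for key, value in sorted_roles: if key in message_lower: return value' loop
def pvScanA (rs : List (String × String)) (ml : String) : Option String :=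
  match rs with
  | [] => none
  | (key, value) :: rest =>
      if PySem.Str.isIn key ml then some value else pvScanA rest ml

def extract_role_enhanced_py (message : String) : Option String :=
  let message_lower := PySem.Str.lower message
  let sorted_roles := PySem.List.sorted pvRoles (fun x => PySem.Str.len x.1) true
  pvScanA sorted_roles message_lower

-- ===== PORT B =====
-- Source B's _ROLE_KEYS: the bare role keys, insertion order.
def pvRoleKeys : List String :=
  ["software engineer", "software developer", "full stack developer",
   "frontend developer", "backend developer", "data scientist",
   "data analyst", "devops engineer", "cloud engineer",
   "security engineer", "mobile developer", "web developer",
   "product manager", "project manager", "engineering manager",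
   "technical lead", "team lead", "business analyst",
   "marketing manager", "sales manager", "account manager",
   "consultant", "business consultant", "ux designer", "ui designer",
   "product designer", "graphic designer", "architect", "designer",
   "developer", "engineer", "manager", "analyst"]

-- Source B's _SPECIAL_WORDS
def pvSpecialWords : PySem.Dict String String :=
  ⟨[("devops", "DevOps"), ("ux", "UX"), ("ui", "UI")]⟩

-- w.capitalize(): first char upper-cased, the rest lower-cased (exact on ASCII)
def pvCapitalize (w : String) : String :=
  match w.toList with
  | [] => w
  | c :: cs => String.ofList (PySem.Chars.upperChar c :: cs.map PySem.Chars.lowerChar)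

-- Source B's _format_role
def pvFormatRole (key : String) : String :=
  if key = "architect" then "Solutions Architect"
  else PySem.Str.join " "
    ((PySem.Str.split₀ key).map (fun w => PySem.Dict.getD pvSpecialWords w (pvCapitalize w)))

-- the body of Source B's 'for key in _ROLE_KEYS' loop: keep the longest match seen so far
def pvBestStep (ml : String) (best : Option String) (key : String) : Option String :=
  if PySem.Str.isIn key ml &&
      (match best with
       | none => true
       | some b => decide (PySem.Str.len b < PySem.Str.len key))
  then some key else best

def extract_role_enhanced_py_alt (message : String) : Option String :=
  let message_lower := PySem.Str.lower message
  match pvRoleKeys.foldl (pvBestStep message_lower) none with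
  | none => none
  | some best => some (pvFormatRole best)

-- ===== PRECONDITION & SPEC =====
def Spec_extract_role_enhanced_py (message : String) (out : Option String) : Prop := out = extract_role_enhanced_py_alt message
instance (message : String) (out : Option String) : Decidable (Spec_extract_role_enhanced_py message out) := by unfold Spec_extract_role_enhanced_py; infer_instance

-- ===== CLAIM (what is proved, stated in full; the proofs are below) =====
def Claim_equal_extract_role_enhanced_py : Prop := ∀ (message : String), Dom_extract_role_enhanced_py message → Spec_extract_role_enhanced_py message (extract_role_enhanced_py message)

-- ===== LEMMAS AND PROOFS =====

-- the running-max step of PySem.List.max? (proof-side helper)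
def pvRM {α : Type} (key : α → Int) (acc : Option α) (x : α) : Option α :=
  match acc with
  | none => some x
  | some m => if key m < key x then some x else some m

theorem max?_eq_foldl_pvRM {α : Type} (key : α → Int) (xs : List α) :
    PySem.List.max? xs key = xs.foldl (pvRM key) none := rfl

-- A's scan loop is find?-then-project.
theorem pvScanA_eq_find? (rs : List (String × String)) (ml : String) :
    pvScanA rs ml = (rs.find? (fun kv => PySem.Str.isIn kv.1 ml)).map (·.2) := by
  induction rs with
  | nil => rfl
  | cons kv rest ih =>
      obtain ⟨k, v⟩ := kv
      cases h : PySem.Chars.isIn k.toList ml.toList <;>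
        simp [pvScanA, h, ih]

-- Inserting a non-matching element does not change find?.
theorem find?_insertBy_neg {α : Type} (b : α → α → Bool) (p : α → Bool) (x : α)
    (hx : p x = false) (s : List α) :
    (PySem.List.insertBy b x s).find? p = s.find? p := by
  induction s with
  | nil => simp [PySem.List.insertBy, List.find?, hx]
  | cons y ys ih =>
      simp only [PySem.List.insertBy]
      by_cases hb : b x y = true
      · simp [hb, List.find?_cons, hx]
      · rw [if_neg hb]
        cases hp : p y <;> simp [hp, ih]

-- Inserting a matching element into a key-descending list: find? becomes a running-max step.
theorem find?_insertBy_pos {α : Type} (key : α → Int) (p : α → Bool) (x : α)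
    (hx : p x = true) (s : List α)
    (hs : s.Pairwise (fun a c => key c ≤ key a)) :
    (PySem.List.insertBy (fun a c => decide (key c < key a)) x s).find? p =
      pvRM key (s.find? p) x := by
  induction s with
  | nil => simp [PySem.List.insertBy, List.find?, hx, pvRM]
  | cons y ys ih =>
      have hy : ∀ c ∈ ys, key c ≤ key y := (List.pairwise_cons.mp hs).1
      have hys : ys.Pairwise (fun a c => key c ≤ key a) := (List.pairwise_cons.mp hs).2
      simp only [PySem.List.insertBy]
      by_cases hb : key y < key x
      · simp only [hb, decide_true, if_true]
        rw [List.find?_cons_of_pos hx]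
        cases hf : (y :: ys).find? p with
        | none => rfl
        | some m =>
            have hm : m ∈ y :: ys := List.mem_of_find?_eq_some hf
            have hkm : key m ≤ key y := by
              rcases List.mem_cons.mp hm with h | h
              · exact le_of_eq (by rw [h])
              · exact hy m h
            simp [pvRM, lt_of_le_of_lt hkm hb]
      · rw [if_neg (by simp [hb])]
        cases hp : p y with
        | true =>
            rw [List.find?_cons_of_pos hp, List.find?_cons_of_pos hp]
            simp [pvRM, hb]
        | false =>
            rw [List.find?_cons_of_neg (by simp [hp]),
              List.find?_cons_of_neg (by simp [hp])]
            exact ih hys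

-- First match of the stable length-descending sort = first longest match.
theorem find?_sorted_eq_max?_filter {α : Type} (key : α → Int) (p : α → Bool)
    (rs : List α) :
    (PySem.List.sorted rs key true).find? p =
      PySem.List.max? (rs.filter p) key := by
  induction rs using List.reverseRecOn with
  | nil => rfl
  | append_singleton rs x ih =>
      have hsorted : PySem.List.sorted (rs ++ [x]) key true =
          PySem.List.insertBy (fun a c => decide (key c < key a)) x
            (PySem.List.sorted rs key true) := by
        rw [PySem.List.sorted_rev_eq_foldl_insertBy, PySem.List.sorted_rev_eq_foldl_insertBy,
          List.foldl_append, List.foldl_cons, List.foldl_nil]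
      rw [hsorted, List.filter_append]
      cases hx : p x with
      | false =>
          rw [find?_insertBy_neg _ _ _ hx, ih]
          simp [List.filter, hx]
      | true =>
          rw [find?_insertBy_pos key p x hx _
            (PySem.List.sorted_pairwise_rev rs key), ih]
          simp only [List.filter, hx]
          rw [max?_eq_foldl_pvRM, max?_eq_foldl_pvRM, List.foldl_append, List.foldl_cons,
            List.foldl_nil]

-- B's guarded fold is the running-max fold over the matching keys.
theorem foldl_bestStep_eq_foldl_filter (ml : String) (xs : List String) (acc : Option String) :
    xs.foldl (pvBestStep ml) acc =
      (xs.filter (fun k => PySem.Str.isIn k ml)).foldl (pvRM PySem.Str.len) acc := by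
  induction xs generalizing acc with
  | nil => rfl
  | cons x t ih =>
      rw [List.foldl_cons]
      cases hx : PySem.Chars.isIn x.toList ml.toList with
      | false =>
          rw [List.filter_cons_of_neg (by simp [PySem.Str.isIn_eq, hx])]
          have : pvBestStep ml acc x = acc := by
            simp [pvBestStep, hx]
          rw [this, ih]
      | true =>
          rw [List.filter_cons_of_pos (by simp [PySem.Str.isIn_eq, hx]), List.foldl_cons]
          have : pvBestStep ml acc x = pvRM PySem.Str.len acc x := by
            cases acc with
            | none => simp [pvBestStep, pvRM, hx]
            | some b =>
                by_cases h : PySem.Str.len b < PySem.Str.len x <;>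
                  simp [pvBestStep, pvRM, hx]
          rw [this, ih]

-- the running-max fold commutes with map (first-extremal is preserved).
theorem foldl_pvRM_map {α β : Type} (key : β → Int) (f : α → β) (t : List α)
    (acc : Option α) :
    (t.map f).foldl (pvRM key) (acc.map f) =
      (t.foldl (pvRM (fun a => key (f a))) acc).map f := by
  induction t generalizing acc with
  | nil => rfl
  | cons y t ih =>
      rw [List.map_cons, List.foldl_cons, List.foldl_cons]
      have : pvRM key (acc.map f) (f y) = (pvRM (fun a => key (f a)) acc y).map f := by
        cases acc with
        | none => rfl
        | some b => by_cases h : key (f b) < key (f y) <;> simp [pvRM, h]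
      rw [this, ih]

-- Source B's key list is the first projection of A's dict.
theorem pvRoleKeys_eq_map : pvRoleKeys = pvRoles.map Prod.fst := by rfl

-- The display value of every dict entry is recomputed exactly by pvFormatRole.
theorem pvFormatRole_correct : ∀ kv ∈ pvRoles, pvFormatRole kv.1 = kv.2 := by
  have h : ∀ kv ∈ pvRoles, (pvFormatRole kv.1).toList = kv.2.toList := by decide
  intro kv hkv
  exact String.toList_inj.mp (h kv hkv)

-- ===== VERDICT (by name: the statement is the Claim_ definition above) =====
theorem extract_role_enhanced_py_spec : Claim_equal_extract_role_enhanced_py := by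
  intro message _
  unfold Spec_extract_role_enhanced_py extract_role_enhanced_py extract_role_enhanced_py_alt
  have hB : pvRoleKeys.foldl (pvBestStep (PySem.Str.lower message)) none =
      (PySem.List.max?
        (pvRoles.filter (fun kv => PySem.Str.isIn kv.1 (PySem.Str.lower message)))
        (fun kv => PySem.Str.len kv.1)).map Prod.fst := by
    rw [pvRoleKeys_eq_map, foldl_bestStep_eq_foldl_filter,
      List.filter_map,
      show (Option.none : Option String) = Option.map Prod.fst none from rfl,
      foldl_pvRM_map, max?_eq_foldl_pvRM]
    rfl
  simp only [pvScanA_eq_find?,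
    find?_sorted_eq_max?_filter (fun x : String × String => PySem.Str.len x.1)
      (fun kv => PySem.Str.isIn kv.1 (PySem.Str.lower message)) pvRoles,
    hB]
  cases hm : PySem.List.max?
      (pvRoles.filter (fun kv => PySem.Str.isIn kv.1 (PySem.Str.lower message)))
      (fun kv : String × String => PySem.Str.len kv.1) with
  | none => rfl
  | some m =>
      have hmem : m ∈ pvRoles := List.mem_of_mem_filter (PySem.List.max?_mem hm)
      simp [pvFormatRole_correct m hmem]
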